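-- pv_equiv track=rewrite | github.com/doubleq2/Tusk1 | ts.py | expand_text
-- ===== SOURCE A (Python) =====
-- def expand_text(sl):
--     if type(sl) != str:
--         return "type Error"
--     else:
--         list = sl.split()
--         text = ""
--         for word in list:
--             sl = {}
--             for i in range(len(word)):
--                 if word[i].isalpha() == False:
--                     sl[i] = word[i]
--             word = [c for c in word if c.isalpha()]
--             word = word[::-1]
--             for i,j in sl.items():
--                 word.insert(i,j)
--             text += "".join(word)+" "
--         text = text[:-1]
--         return(text)
-- ===== SOURCE B (Python) =====
-- def expand_text(sl):
--     if type(sl) != str: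
--         return "type Error"
--     rebuilt = []
--     for word in sl.split():
--         rev = [c for c in word if c.isalpha()][::-1]
--         chars = []
--         k = 0
--         for c in word:
--             if c.isalpha():
--                 chars.append(rev[k])
--                 k += 1
--             else:
--                 chars.append(c)
--         rebuilt.append(''.join(chars))
--     return ' '.join(rebuilt)
-- ===== Notes on version B (the rewrite author's own statement) =====
-- stated objective: simpler
-- what changed: Per word, B rebuilds the string in one pass pulling from the reversed alphabetic-character list and joins the words with str.join, replacing A's dict of non-alphabetic positions, list reversal and repeated list.insert reconstruction.
import Mathlib
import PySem

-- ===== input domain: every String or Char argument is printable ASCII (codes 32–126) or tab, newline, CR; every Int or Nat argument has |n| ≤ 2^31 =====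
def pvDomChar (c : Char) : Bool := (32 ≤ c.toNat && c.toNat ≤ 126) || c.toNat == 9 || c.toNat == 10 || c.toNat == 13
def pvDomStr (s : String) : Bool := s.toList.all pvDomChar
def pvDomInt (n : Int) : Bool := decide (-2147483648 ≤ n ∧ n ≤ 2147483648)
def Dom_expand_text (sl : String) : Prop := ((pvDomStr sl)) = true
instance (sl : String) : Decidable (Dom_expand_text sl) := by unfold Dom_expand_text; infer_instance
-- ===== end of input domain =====

-- B replaces A's position-dictionary + list.insert reconstruction by one pass per word
-- pulling from the reversed alphabetic characters (objective: simpler).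

-- ===== PORT A =====
-- the 'type(sl) != str' guard cannot fire for a String argument and is omitted
def expand_text (sl : String) : String :=
  let list := PySem.Chars.split₀ sl.toList
  let text : List Char := list.foldl (fun text word =>
    let d : PySem.Dict Int Char :=
      (PySem.List.pyRange 0 (PySem.List.len word) 1).foldl
        (fun d i =>
          if PySem.Chars.isalpha (PySem.List.pyGetD word i ' ') == false then
            d.insert i (PySem.List.pyGetD word i ' ')
          else d) PySem.Dict.empty
    let word := word.filter (fun c => PySem.Chars.isalpha c)
    let word := word.reverse  -- word[::-1]; exact by PySem.List.slice?_none_none_neg_one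
    let word := d.items.foldl (fun w p => PySem.List.insert w p.1 p.2) word
    text ++ word ++ [' ']) []
  String.ofList (PySem.List.slice text none (some (-1)))

-- ===== PORT B =====
-- the inner `for c in word` loop of Source B; rev[k] is always in range because rev holds
-- exactly the alphabetic characters of word, so headD's default is never used
def bFill : List Char → List Char → List Char
  | [], _ => []
  | c :: cs, rev =>
    if PySem.Chars.isalpha c then rev.headD c :: bFill cs rev.tail
    else c :: bFill cs rev

def expand_text_alt (sl : String) : String :=
  let rebuilt := (PySem.Chars.split₀ sl.toList).map (fun word =>
    bFill word ((word.filter (fun c => PySem.Chars.isalpha c)).reverse))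
  String.ofList (PySem.Chars.join [' '] rebuilt)

-- ===== PRECONDITION & SPEC =====
def Spec_expand_text (sl : String) (out : String) : Prop := out = expand_text_alt sl
instance (sl : String) (out : String) : Decidable (Spec_expand_text sl out) := by unfold Spec_expand_text; infer_instance

-- ===== CLAIM (what is proved, stated in full; the proofs are below) =====
def Claim_equal_expand_text : Prop := ∀ (sl : String), Dom_expand_text sl → Spec_expand_text sl (expand_text sl)

-- ===== LEMMAS AND PROOFS =====

-- the non-alphabetic characters of a word, paired with their positions (offset k)
def nae : List Char → Nat → List (Nat × Char)
  | [], _ => []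
  | c :: cs, k => if PySem.Chars.isalpha c then nae cs (k+1) else (k, c) :: nae cs (k+1)

-- A's first inner loop: the dict collects exactly the non-alphabetic (position, char) pairs
lemma dict_items (cs : List Char) : ∀ (k : Nat) (w : List Char) (d : PySem.Dict Int Char),
    w.drop k = cs →
    (∀ p ∈ d.items, ∃ m : Nat, p.1 = (m : Int) ∧ m < k) →
    ((PySem.List.pyRange (k : Int) (PySem.List.len w) 1).foldl
        (fun d i =>
          if PySem.Chars.isalpha (PySem.List.pyGetD w i ' ') == false then
            d.insert i (PySem.List.pyGetD w i ' ')
          else d) d).items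
      = d.items ++ (nae cs k).map (fun p => ((p.1 : Int), p.2)) := by
  induction cs with
  | nil =>
    intro k w d hdrop _
    have hlen : w.length ≤ k := List.drop_eq_nil_iff.mp hdrop
    have hnot : ¬((k : Int) < (w.length : Int)) := by omega
    simp [PySem.List.len, PySem.List.pyRange, hnot, nae]
  | cons c cs ih =>
    intro k w d hdrop hkeys
    have hk : k < w.length := by
      by_contra h
      rw [List.drop_eq_nil_iff.mpr (by omega)] at hdrop
      simp at hdrop
    have hget : PySem.List.pyGetD w (k : Int) ' ' = c := by
      have h1 : w[k]? = some c := by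
        rw [← List.head?_drop, hdrop]; rfl
      simp [PySem.List.pyGetD_natCast, List.getD, h1]
    have hcons : PySem.List.pyRange (k : Int) (PySem.List.len w) 1
        = (k : Int) :: PySem.List.pyRange ((k : Int) + 1) (PySem.List.len w) 1 := by
      have : (k : Int) < PySem.List.len w := by simp [PySem.List.len]; omega
      exact PySem.List.pyRange_one_cons this
    have hdrop' : w.drop (k + 1) = cs := by
      have h := congrArg (List.drop 1) hdrop
      rw [List.drop_drop] at h
      simpa using h
    rw [hcons, List.foldl_cons, hget]
    by_cases ha : PySem.Chars.isalpha c = true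
    · rw [ha, show ((true : Bool) == false) = false from rfl, if_neg (by simp)]
      have := ih (k + 1) w d hdrop' (fun p hp => by
        obtain ⟨m, hm, hmk⟩ := hkeys p hp; exact ⟨m, hm, by omega⟩)
      push_cast at this ⊢
      rw [this]
      simp [nae, ha]
    · have ha' : PySem.Chars.isalpha c = false := by simp_all
      rw [ha', show ((false : Bool) == false) = true from rfl, if_pos rfl]
      have hnc : d.contains (k : Int) = false := by
        simp only [PySem.Dict.contains, List.any_eq_false]
        intro p hp
        obtain ⟨m, hm, hmk⟩ := hkeys p hp
        simp [hm]
        omega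
      have hins : (d.insert (k : Int) c).items = d.items ++ [((k : Int), c)] := by
        simp [PySem.Dict.insert, hnc]
      have := ih (k + 1) w (d.insert (k : Int) c) hdrop' (fun p hp => by
        rw [hins] at hp
        rcases List.mem_append.mp hp with h | h
        · obtain ⟨m, hm, hmk⟩ := hkeys p h; exact ⟨m, hm, by omega⟩
        · simp at h; exact ⟨k, by simp [h], by omega⟩)
      push_cast at this ⊢
      rw [this, hins]
      simp [nae, ha']

-- A's insert loop, fed the (position, char) pairs in increasing position order,
-- interleaves them exactly as B's single pass does
lemma insert_fold (cs : List Char) : ∀ (pre rev : List Char),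
    rev.length = cs.countP (fun c => PySem.Chars.isalpha c) →
    (nae cs pre.length).foldl (fun w p => PySem.List.insert w (p.1 : Int) p.2) (pre ++ rev)
      = pre ++ bFill cs rev := by
  induction cs with
  | nil =>
    intro pre rev hlen
    simp [nae, bFill]
    simpa using List.length_eq_zero_iff.mp (by simpa using hlen)
  | cons c cs ih =>
    intro pre rev hlen
    by_cases ha : PySem.Chars.isalpha c = true
    · rw [List.countP_cons, if_pos (by simp [ha])] at hlen
      cases rev with
      | nil => simp at hlen
      | cons r rs =>
        simp only [nae, ha, if_true, bFill, List.headD, List.tail_cons]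
        rw [show pre ++ r :: rs = (pre ++ [r]) ++ rs by simp,
            show pre.length + 1 = (pre ++ [r]).length by simp,
            ih (pre ++ [r]) rs (by simpa using hlen)]
        simp
    · have ha' : PySem.Chars.isalpha c = false := by simp_all
      rw [List.countP_cons, if_neg (by simp [ha'])] at hlen
      simp only [nae, ha', Bool.false_eq_true, if_false, List.foldl_cons]
      rw [PySem.List.insert_natCast _ _ _ (by simp), List.take_left, List.drop_left]
      rw [show pre ++ c :: rev = (pre ++ [c]) ++ rev by simp]
      have := ih (pre ++ [c]) rev (by simpa using hlen)
      simp only [List.length_append, List.length_cons, List.length_nil] at this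
      rw [this]
      simp [bFill, ha']

-- A's trailing-space-then-trim assembly equals join-with-a-single-space
lemma flat_dropLast (ps : List (List Char)) :
    (ps.flatMap (fun w => w ++ [' '])).dropLast = [' '].intercalate ps := by
  induction ps with
  | nil => simp [List.intercalate]
  | cons w ps ih =>
    cases ps with
    | nil => simp [List.intercalate]
    | cons q qs =>
      rw [List.flatMap_cons, List.dropLast_append_of_ne_nil (by simp [List.flatMap_cons]), ih]
      simp [List.intercalate]

-- per word, A's dict + insert reconstruction equals B's single pass
lemma word_eq (w : List Char) :
    (((PySem.List.pyRange 0 (PySem.List.len w) 1).foldl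
        (fun d i =>
          if PySem.Chars.isalpha (PySem.List.pyGetD w i ' ') == false then
            d.insert i (PySem.List.pyGetD w i ' ')
          else d) PySem.Dict.empty).items.foldl
      (fun ws p => PySem.List.insert ws p.1 p.2)
      ((w.filter (fun c => PySem.Chars.isalpha c)).reverse))
    = bFill w ((w.filter (fun c => PySem.Chars.isalpha c)).reverse) := by
  have hd := dict_items w 0 w PySem.Dict.empty (by simp) (by simp [PySem.Dict.empty])
  rw [show ((0 : Nat) : Int) = 0 from rfl] at hd
  rw [hd]
  simp only [PySem.Dict.empty, List.nil_append, List.foldl_map]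
  have := insert_fold w ([] : List Char)
    ((w.filter (fun c => PySem.Chars.isalpha c)).reverse)
    (by simp [List.countP_eq_length_filter])
  simpa using this

-- ===== VERDICT (by name: the statement is the Claim_ definition above) =====
theorem expand_text_spec : Claim_equal_expand_text := by
  intro sl _
  unfold Spec_expand_text expand_text expand_text_alt
  dsimp only
  congr 1
  rw [PySem.List.slice_to_neg_one]
  have hfold :
      (PySem.Chars.split₀ sl.toList).foldl (fun (text : List Char) word =>
        text ++ (((PySem.List.pyRange 0 (PySem.List.len word) 1).foldl
          (fun d i =>
            if PySem.Chars.isalpha (PySem.List.pyGetD word i ' ') == false then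
              d.insert i (PySem.List.pyGetD word i ' ')
            else d) PySem.Dict.empty).items.foldl
            (fun ws p => PySem.List.insert ws p.1 p.2)
            ((word.filter (fun c => PySem.Chars.isalpha c)).reverse)) ++ [' ']) []
      = (PySem.Chars.split₀ sl.toList).flatMap (fun word =>
          bFill word ((word.filter (fun c => PySem.Chars.isalpha c)).reverse) ++ [' ']) := by
    have h1 := PySem.List.foldl_append_eq_flatMap
      (g := fun word => bFill word ((word.filter (fun c => PySem.Chars.isalpha c)).reverse) ++ [' '])
      (l := PySem.Chars.split₀ sl.toList) (acc := ([] : List Char))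
    rw [← List.nil_append ((PySem.Chars.split₀ sl.toList).flatMap _), ← h1]
    apply PySem.List.foldl_congr_mem
    intro acc x _
    rw [word_eq x, List.append_assoc]
  rw [hfold,
    ← List.flatMap_map (fun word => bFill word ((word.filter (fun c => PySem.Chars.isalpha c)).reverse))
      (fun w => w ++ [' ']) (PySem.Chars.split₀ sl.toList),
    flat_dropLast]
  simp [PySem.Chars.join]
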